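-- pv_equiv track=rewrite | github.com/SBS-NCENTER/GODO_PI | godo-webctl/src/godo_webctl/services.py | _parse_environment_value
-- ===== SOURCE A (Python) =====
-- def _parse_environment_value(raw: str) -> dict[str, str]:
--     """Parse the value of `Environment=` (one logical line) into a dict.
--
--     systemd serializes `Environment=` as space-separated `KEY=VALUE`
--     tokens; tokens whose VALUE contains spaces / quotes are wrapped in
--     `"..."` (POSIX shell-style). Backslash and `\\n` literals follow
--     systemd's `serialize.c::write_string` rules; we only need to recover
--     the unquoted KEY=VALUE pairs (the SPA renders the value verbatim,
--     redaction-substituted at the KEY level)."""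
--     if not raw:
--         return {}
--     env: dict[str, str] = {}
--     i = 0
--     n = len(raw)
--     while i < n:
--         # Skip leading whitespace.
--         while i < n and raw[i] == " ":
--             i += 1
--         if i >= n:
--             break
--         # Read one token. If it starts with `"`, read until the matching
--         # unescaped `"`. Otherwise read until the next unescaped space.
--         if raw[i] == '"':
--             i += 1
--             buf: list[str] = []
--             while i < n:
--                 c = raw[i]
--                 if c == "\\" and i + 1 < n:
--                     # systemd-style escape: \" → ", \\ → \, \n → newline.
--                     nxt = raw[i + 1]
--                     if nxt == "n":
--                         buf.append("\n")
--                     elif nxt == "t":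
--                         buf.append("\t")
--                     else:
--                         buf.append(nxt)
--                     i += 2
--                     continue
--                 if c == '"':
--                     i += 1
--                     break
--                 buf.append(c)
--                 i += 1
--             token = "".join(buf)
--         else:
--             buf2: list[str] = []
--             while i < n and raw[i] != " ":
--                 c = raw[i]
--                 if c == "\\" and i + 1 < n:
--                     nxt = raw[i + 1]
--                     if nxt == "n":
--                         buf2.append("\n")
--                     elif nxt == "t":
--                         buf2.append("\t")
--                     else:
--                         buf2.append(nxt)
--                     i += 2
--                     continue
--                 buf2.append(c)
--                 i += 1
--             token = "".join(buf2)
--         # Token: split on the FIRST `=`. Tokens without `=` are skipped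
--         # (malformed; should never happen for a healthy unit).
--         if "=" not in token:
--             continue
--         k, _, v = token.partition("=")
--         if k:
--             env[k] = v
--     return env
-- ===== SOURCE B (Python) =====
-- import re
--
-- # Tokenize the whole line in one regex pass (space runs / quoted tokens /
-- # unquoted tokens), then unescape each raw token and split on the first '='.
-- _TOKEN_RE = re.compile(r'( +)|"((?:\\[\s\S]|[^"])*)"?|((?:\\[\s\S]|[^ ])+)')
-- _ESCAPE_RE = re.compile(r'\\([\s\S])')
-- _ESCAPES = {'n': '\n', 't': '\t'}
--
--
-- def _unescape(tok: str) -> str: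
--     return _ESCAPE_RE.sub(lambda m: _ESCAPES.get(m.group(1), m.group(1)), tok)
--
--
-- def _parse_environment_value(raw: str) -> dict[str, str]:
--     env: dict[str, str] = {}
--     for m in _TOKEN_RE.finditer(raw):
--         if m.group(1) is not None:
--             continue  # a run of spaces
--         tok = m.group(2) if m.group(2) is not None else m.group(3)
--         k, sep, v = _unescape(tok).partition('=')
--         if sep and k:
--             env[k] = v
--     return env
-- ===== Notes on version B (the rewrite author's own statement) =====
-- stated objective: idiomatic
-- what changed: A's single-pass hand-rolled character cursor that decodes escapes while scanning is replaced by a two-phase regex pipeline: one finditer pass tokenizes the line (space runs / quoted tokens / unquoted tokens, escapes kept raw), then each token gets a single re.sub unescape pass before splitting on the first '='.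
import Mathlib
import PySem

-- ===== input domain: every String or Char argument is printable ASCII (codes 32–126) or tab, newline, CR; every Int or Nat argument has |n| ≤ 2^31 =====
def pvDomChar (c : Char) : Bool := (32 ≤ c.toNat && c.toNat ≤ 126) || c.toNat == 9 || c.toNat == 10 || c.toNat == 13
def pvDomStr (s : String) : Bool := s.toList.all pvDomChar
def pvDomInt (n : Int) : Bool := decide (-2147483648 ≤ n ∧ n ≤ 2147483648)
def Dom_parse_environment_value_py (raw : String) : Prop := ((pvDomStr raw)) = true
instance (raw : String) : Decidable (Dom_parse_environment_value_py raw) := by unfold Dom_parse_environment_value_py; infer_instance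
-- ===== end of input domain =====

-- B replaces A's single-pass char cursor (escapes decoded while scanning) by a two-phase
-- regex-style tokenizer (raw tokens first, then one unescape pass per token); objective: idiomatic.

-- ===== PORT A =====
-- A's inner `while raw[i] == " "` loop.
def pySkipSpaces : List Char → List Char
  | ' ' :: rest => pySkipSpaces rest
  | l => l

-- A's quoted-token loop: decodes escapes while reading, stops after an unescaped '"'.
def pyReadQuoted : List Char → List Char × List Char
  | '\\' :: x :: rest =>
      match pyReadQuoted rest with
      | (buf, r) => ((if x = 'n' then '\n' else if x = 't' then '\t' else x) :: buf, r)
  | '"' :: rest => ([], rest)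
  | c :: rest =>
      match pyReadQuoted rest with
      | (buf, r) => (c :: buf, r)
  | [] => ([], [])

-- A's unquoted-token loop: decodes escapes while reading, stops before an unescaped space.
def pyReadUnquoted : List Char → List Char × List Char
  | ' ' :: rest => ([], ' ' :: rest)
  | '\\' :: x :: rest =>
      match pyReadUnquoted rest with
      | (buf, r) => ((if x = 'n' then '\n' else if x = 't' then '\t' else x) :: buf, r)
  | c :: rest =>
      match pyReadUnquoted rest with
      | (buf, r) => (c :: buf, r)
  | [] => ([], [])

-- `if "=" not in token: continue` / `partition("=")` / `if k: env[k] = v`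
def pyStoreToken (env : PySem.Dict String String) (tok : List Char) : PySem.Dict String String :=
  if '=' ∈ tok then
    if tok.takeWhile (· ≠ '=') ≠ [] then
      env.insert (String.ofList (tok.takeWhile (· ≠ '='))) (String.ofList ((tok.dropWhile (· ≠ '=')).tail))
    else env
  else env

-- termination helpers for the outer while loop (cited by pyLoop's decreasing_by)
theorem pySkipSpaces_length_le : ∀ l : List Char, (pySkipSpaces l).length ≤ l.length := by
  intro l
  fun_induction pySkipSpaces l <;> simp_all <;> omega

theorem pySkipSpaces_head_ne : ∀ (l : List Char) (c : Char) (rest : List Char),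
    pySkipSpaces l = c :: rest → c ≠ ' ' := by
  intro l
  fun_induction pySkipSpaces l with
  | case1 rest ih => exact ih
  | case2 l' h =>
      intro c rest hce hc
      subst hc
      exact h rest hce

theorem pyReadQuoted_length_le : ∀ l : List Char, (pyReadQuoted l).2.length ≤ l.length := by
  intro l
  fun_induction pyReadQuoted l <;> simp_all <;> omega

theorem pyReadUnquoted_len : ∀ l : List Char,
    (pyReadUnquoted l).2.length ≤ l.length ∧
      ((pyReadUnquoted l).2.length ≤ l.tail.length ∨ l.head? = some ' ') := by
  intro l
  fun_induction pyReadUnquoted l <;> simp_all <;> omega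

theorem pyReadUnquoted_cons_le (c : Char) (rest : List Char) (hc : c ≠ ' ') :
    (pyReadUnquoted (c :: rest)).2.length ≤ rest.length := by
  have h := (pyReadUnquoted_len (c :: rest)).2
  simpa [hc] using h

-- A's outer `while i < n` loop.
def pyLoop (l : List Char) (env : PySem.Dict String String) : PySem.Dict String String :=
  match h : pySkipSpaces l with
  | [] => env
  | c :: rest =>
      if c = '"' then
        match hp : pyReadQuoted rest with
        | (buf, r) => pyLoop r (pyStoreToken env buf)
      else
        match hp : pyReadUnquoted (c :: rest) with
        | (buf, r) => pyLoop r (pyStoreToken env buf)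
  termination_by l.length
  decreasing_by
  · have h1 : (c :: rest).length ≤ l.length := h ▸ pySkipSpaces_length_le l
    have h2 := pyReadQuoted_length_le rest
    rw [hp] at h2
    simp at h1 h2
    omega
  · have h1 : (c :: rest).length ≤ l.length := h ▸ pySkipSpaces_length_le l
    have h2 := pyReadUnquoted_cons_le c rest (pySkipSpaces_head_ne l c rest h)
    rw [hp] at h2
    simp at h1 h2
    omega

def parse_environment_value_py (raw : String) : List (String × String) :=
  if raw.toList = [] then []
  else (pyLoop raw.toList PySem.Dict.empty).items

-- ===== PORT B =====
-- Source B's regex is matched by hand (exact: the regex is deterministic — ordered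
-- alternation, greedy repetition, no backtracking can occur).
-- group 2 of the quoted alternative `"((?:\\[\s\S]|[^"])*)"?`: raw content, escapes kept.
def altMatchQuoted : List Char → List Char × List Char
  | '\\' :: x :: rest =>
      match altMatchQuoted rest with
      | (tok, r) => ('\\' :: x :: tok, r)
  | '"' :: rest => ([], rest)
  | c :: rest =>
      match altMatchQuoted rest with
      | (tok, r) => (c :: tok, r)
  | [] => ([], [])

-- group 3, the unquoted alternative `((?:\\[\s\S]|[^ ])+)`: raw token, escapes kept.
def altMatchPlain : List Char → List Char × List Char
  | ' ' :: rest => ([], ' ' :: rest)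
  | '\\' :: x :: rest =>
      match altMatchPlain rest with
      | (tok, r) => ('\\' :: x :: tok, r)
  | c :: rest =>
      match altMatchPlain rest with
      | (tok, r) => (c :: tok, r)
  | [] => ([], [])

-- termination helpers for altTokenize (cited in its decreasing_by)
theorem altMatchQuoted_length_le : ∀ l : List Char, (altMatchQuoted l).2.length ≤ l.length := by
  intro l
  fun_induction altMatchQuoted l <;> simp_all <;> omega

theorem altMatchPlain_len : ∀ l : List Char,
    (altMatchPlain l).2.length ≤ l.length ∧
      ((altMatchPlain l).2.length ≤ l.tail.length ∨ l.head? = some ' ') := by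
  intro l
  fun_induction altMatchPlain l <;> simp_all <;> omega

theorem altMatchPlain_cons_le (c : Char) (rest : List Char) (hc : c ≠ ' ') :
    (altMatchPlain (c :: rest)).2.length ≤ rest.length := by
  have h := (altMatchPlain_len (c :: rest)).2
  simpa [hc] using h

-- `_TOKEN_RE.finditer(raw)`, keeping only the token groups (raw, escapes unprocessed).
def altTokenize (l : List Char) : List (List Char) :=
  match l with
  | [] => []
  | c :: rest =>
      if hsp : c = ' ' then altTokenize rest
      else if c = '"' then
        match hp : altMatchQuoted rest with
        | (tok, r) => tok :: altTokenize r
      else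
        match hp : altMatchPlain (c :: rest) with
        | (tok, r) => tok :: altTokenize r
  termination_by l.length
  decreasing_by
  · simp
  · have := altMatchQuoted_length_le rest
    rw [hp] at this
    simp
    omega
  · have := altMatchPlain_cons_le c rest hsp
    rw [hp] at this
    simp
    omega

-- `_ESCAPE_RE.sub` over one token (left-to-right, non-overlapping).
def altUnescape : List Char → List Char
  | '\\' :: x :: rest =>
      (if x = 'n' then '\n' else if x = 't' then '\t' else x) :: altUnescape rest
  | c :: rest => c :: altUnescape rest
  | [] => []

-- the per-token body of Source B's `for` loop
def altInsert (env : PySem.Dict String String) (tok : List Char) : PySem.Dict String String :=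
  pyStoreToken env (altUnescape tok)

def parse_environment_value_py_alt (raw : String) : List (String × String) :=
  ((altTokenize raw.toList).foldl altInsert PySem.Dict.empty).items

-- ===== PRECONDITION & SPEC =====
def Spec_parse_environment_value_py (raw : String) (out : List (String × String)) : Prop := out = parse_environment_value_py_alt raw
instance (raw : String) (out : List (String × String)) : Decidable (Spec_parse_environment_value_py raw out) := by unfold Spec_parse_environment_value_py; infer_instance

-- ===== CLAIM (what is proved, stated in full; the proofs are below) =====
def Claim_equal_parse_environment_value_py : Prop := ∀ (raw : String), Dom_parse_environment_value_py raw → Spec_parse_environment_value_py raw (parse_environment_value_py raw)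

-- ===== LEMMAS AND PROOFS =====

theorem altUnescape_cons_ne (c : Char) (t : List Char) (h : c ≠ '\\') :
    altUnescape (c :: t) = c :: altUnescape t := by
  cases t <;> simp [altUnescape, h]

theorem quoted_eq : ∀ l : List Char,
    pyReadQuoted l = (altUnescape (altMatchQuoted l).1, (altMatchQuoted l).2) := by
  intro l
  fun_induction pyReadQuoted l
  all_goals simp_all [altMatchQuoted, altUnescape]
  rename_i c rest buf r hsh hnq hconj heq
  by_cases hc : c = '\\'
  · subst hc
    have hrest : rest = [] := by
      cases rest with
      | nil => rfl
      | cons a b => exact absurd rfl (hsh a b rfl)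
    subst hrest
    simp_all [altMatchQuoted, altUnescape]
  · rw [altUnescape_cons_ne c _ hc]
    simp_all

theorem unquoted_eq : ∀ l : List Char,
    pyReadUnquoted l = (altUnescape (altMatchPlain l).1, (altMatchPlain l).2) := by
  intro l
  fun_induction pyReadUnquoted l
  all_goals simp_all [altMatchPlain, altUnescape]
  rename_i c rest buf r hns hsh hconj heq
  by_cases hc : c = '\\'
  · subst hc
    have hrest : rest = [] := by
      cases rest with
      | nil => rfl
      | cons a b => exact absurd rfl (hsh a b rfl)
    subst hrest
    simp_all [altMatchPlain, altUnescape]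
  · rw [altUnescape_cons_ne c _ hc]
    simp_all

theorem pySkipSpaces_cons_space (rest : List Char) : pySkipSpaces (' ' :: rest) = pySkipSpaces rest := rfl

theorem pySkipSpaces_eq_or : ∀ l : List Char, pySkipSpaces l = l ∨ l.head? = some ' ' := by
  intro l
  fun_induction pySkipSpaces l <;> simp_all

theorem pySkipSpaces_cons_ne (c : Char) (rest : List Char) (h : c ≠ ' ') :
    pySkipSpaces (c :: rest) = c :: rest := by
  have h2 := pySkipSpaces_eq_or (c :: rest)
  simpa [h] using h2

theorem tokenize_skip : ∀ l : List Char, altTokenize l = altTokenize (pySkipSpaces l) := by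
  intro l
  induction l with
  | nil => rfl
  | cons c rest ih =>
      by_cases h : c = ' '
      · subst h
        rw [pySkipSpaces_cons_space, ← ih, altTokenize]
        simp
      · rw [pySkipSpaces_cons_ne c rest h]

theorem altTokenize_nil : altTokenize [] = [] := by rw [altTokenize]

theorem altTokenize_quoted (rest : List Char) :
    altTokenize ('"' :: rest) = (altMatchQuoted rest).1 :: altTokenize (altMatchQuoted rest).2 := by
  rw [altTokenize]
  simp

theorem altTokenize_plain (c : Char) (rest : List Char) (h1 : c ≠ ' ') (h2 : c ≠ '"') :
    altTokenize (c :: rest) = (altMatchPlain (c :: rest)).1 :: altTokenize (altMatchPlain (c :: rest)).2 := by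
  rw [altTokenize]
  simp [h1, h2]

theorem loop_eq : ∀ (l : List Char) (env : PySem.Dict String String),
    pyLoop l env = (altTokenize l).foldl altInsert env := by
  intro l env
  fun_induction pyLoop l env with
  | case1 l env h =>
      rw [tokenize_skip l, h, altTokenize_nil]
      rfl
  | case2 l env rest buf r hp h ih =>
      rw [tokenize_skip l, h, altTokenize_quoted]
      have hq := quoted_eq rest
      rw [hp] at hq
      simp only [Prod.mk.injEq] at hq
      simp only [List.foldl_cons, altInsert]
      rw [← hq.1, ← hq.2]
      exact ih
  | case3 l env c rest h hc buf r hp ih =>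
      have hsp : c ≠ ' ' := pySkipSpaces_head_ne l c rest h
      rw [tokenize_skip l, h, altTokenize_plain c rest hsp hc]
      have hq := unquoted_eq (c :: rest)
      rw [hp] at hq
      simp only [Prod.mk.injEq] at hq
      simp only [List.foldl_cons, altInsert]
      rw [← hq.1, ← hq.2]
      exact ih

-- ===== VERDICT (by name: the statement is the Claim_ definition above) =====
theorem parse_environment_value_py_spec : Claim_equal_parse_environment_value_py := by
  intro raw _
  unfold Spec_parse_environment_value_py parse_environment_value_py parse_environment_value_py_alt
  by_cases h : raw.toList = []
  · rw [if_pos h, h, altTokenize_nil]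
    rfl
  · rw [if_neg h, loop_eq]
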